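-- pv_equiv track=rewrite | github.com/eirikbe01/advent-of-code2025 | day_10/day_10.py | bfs
-- ===== SOURCE A (Python) =====
-- from collections import deque
--
-- def bfs(list_of_masks, target):
--     visited = set()
--     queue = deque()
--
--     initial_state = (0, 0) # (XOR sum, num_masks)
--     queue.append(initial_state)
--     visited.add(0)
--
--     while queue:
--         curr_xor_sum, count = queue.popleft()
--
--         if curr_xor_sum == target:
--             return count
--
--         for mask in list_of_masks:
--             # Bitwise operation
--             next_xor_sum = curr_xor_sum ^ mask
--             if next_xor_sum not in visited:
--                 visited.add(next_xor_sum)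
--                 queue.append((next_xor_sum, count + 1))
--     return -1
-- ===== SOURCE B (Python) =====
-- def bfs(list_of_masks, target):
--     # Minimum-size subset whose XOR is target, by include/exclude recursion
--     # over the mask list (no graph search): repeating a mask in a sequence
--     # cancels under XOR, so the shortest mask sequence is a smallest subset.
--     def best(masks, t):
--         if not masks:
--             return 0 if t == 0 else None
--         skip = best(masks[1:], t)
--         take = best(masks[1:], t ^ masks[0])
--         if take is not None:
--             take += 1
--         if skip is None:
--             return take
--         if take is None:
--             return skip
--         return min(skip, take)
--
--     r = best(list_of_masks, target)
--     return -1 if r is None else r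
-- ===== Notes on version B (the rewrite author's own statement) =====
-- stated objective: alternative
-- what changed: Replaces A's BFS over XOR states (deque + visited set) by an include/exclude recursion over the mask list that computes the minimum-size subset XOR-ing to target, using that repeated masks cancel so shortest sequence = smallest subset.
import Mathlib
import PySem

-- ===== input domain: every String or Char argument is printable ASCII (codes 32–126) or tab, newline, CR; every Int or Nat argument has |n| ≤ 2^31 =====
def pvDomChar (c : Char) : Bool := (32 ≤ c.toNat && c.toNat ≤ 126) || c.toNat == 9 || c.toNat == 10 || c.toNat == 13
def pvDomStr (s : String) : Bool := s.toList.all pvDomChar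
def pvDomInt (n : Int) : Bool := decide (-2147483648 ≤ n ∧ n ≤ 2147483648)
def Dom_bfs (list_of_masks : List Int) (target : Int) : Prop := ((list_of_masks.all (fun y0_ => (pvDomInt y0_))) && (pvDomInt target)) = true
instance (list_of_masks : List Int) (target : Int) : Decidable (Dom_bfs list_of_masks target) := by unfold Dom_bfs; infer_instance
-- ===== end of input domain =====

-- B replaces A's BFS over XOR states by an include/exclude recursion over the mask list computing the
-- minimum-size subset XOR-ing to target (repeats cancel, so shortest sequence = smallest subset);
-- objective: alternative algorithm, same worst-case exponential cost.

-- ===== PORT A =====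
-- inner 'for mask in list_of_masks' loop of A, acting on (queue, visited)
def bfsStep (list_of_masks : List Int) (qv : List (Int × Int) × PySem.Set Int)
    (cur : Int × Int) : List (Int × Int) × PySem.Set Int :=
  list_of_masks.foldl (fun qv mask =>
    let next_xor_sum := PySem.Int.bxor cur.1 mask
    if PySem.Set.contains qv.2 next_xor_sum then qv
    else (qv.1 ++ [(next_xor_sum, cur.2 + 1)], PySem.Set.add qv.2 next_xor_sum)) qv

-- A's 'while queue' loop; the fuel only makes the recursion structural
-- (lemmas below show 2 ^ |masks| + 1 pops always suffice, so the guard branch is never the result)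
def bfsLoop (list_of_masks : List Int) (target : Int) :
    Nat → List (Int × Int) → PySem.Set Int → Int
  | 0, _, _ => -1
  | fuel + 1, queue, visited =>
    match queue with
    | [] => -1
    | (curr_xor_sum, count) :: rest =>
      if curr_xor_sum = target then count
      else
        let qv := bfsStep list_of_masks (rest, visited) (curr_xor_sum, count)
        bfsLoop list_of_masks target fuel qv.1 qv.2

def bfs (list_of_masks : List Int) (target : Int) : Int :=
  bfsLoop list_of_masks target (2 ^ list_of_masks.length + 1) [(0, 0)]
    (PySem.Set.add PySem.Set.empty 0)

-- ===== PORT B =====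
-- Source B's recursive helper 'best(masks, t)': None → none, an int count → some count
def bestAux : List Int → Int → Option Nat
  | [], t => if t = 0 then some 0 else none
  | m :: ms, t =>
    let skip := bestAux ms t
    let take := (bestAux ms (PySem.Int.bxor t m)).map (· + 1)
    match skip, take with
    | none, tk => tk
    | some s, none => some s
    | some s, some tk => some (min s tk)

def bfs_alt (list_of_masks : List Int) (target : Int) : Int :=
  match bestAux list_of_masks target with
  | none => -1
  | some n => (n : Int)

-- ===== PRECONDITION & SPEC =====
def Spec_bfs (list_of_masks : List Int) (target : Int) (out : Int) : Prop := out = bfs_alt list_of_masks target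
instance (list_of_masks : List Int) (target : Int) (out : Int) : Decidable (Spec_bfs list_of_masks target out) := by unfold Spec_bfs; infer_instance

-- ===== CLAIM (what is proved, stated in full; the proofs are below) =====
def Claim_equal_bfs : Prop := ∀ (list_of_masks : List Int) (target : Int), Dom_bfs list_of_masks target → Spec_bfs list_of_masks target (bfs list_of_masks target)

-- ===== LEMMAS AND PROOFS =====

-- xor algebra for PySem.Int.bxor
theorem pv_not_one_le_neg (n : Nat) : ¬ (1:Int) ≤ -(n:Int) := by omega

theorem pv_bxor_assoc (a b c : Int) :
    PySem.Int.bxor (PySem.Int.bxor a b) c = PySem.Int.bxor a (PySem.Int.bxor b c) := by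
  by_cases ha : (0:Int) ≤ a <;> by_cases hb : (0:Int) ≤ b <;> by_cases hc : (0:Int) ≤ c <;>
    simp [PySem.Int.bxor, ha, hb, hc,
      pv_not_one_le_neg, Nat.xor_assoc]

theorem pv_bxor_cancel (b m : Int) :
    PySem.Int.bxor (PySem.Int.bxor b m) m = b := by
  rw [pv_bxor_assoc, PySem.Int.bxor_self, PySem.Int.bxor_zero]

theorem pv_bxor_cancel_left (m b : Int) :
    PySem.Int.bxor m (PySem.Int.bxor m b) = b := by
  rw [← pv_bxor_assoc, PySem.Int.bxor_self, PySem.Int.bxor_comm]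
  exact PySem.Int.bxor_zero b

theorem pv_bxor_swap (b m0 m : Int) :
    PySem.Int.bxor (PySem.Int.bxor b m0) m = PySem.Int.bxor (PySem.Int.bxor b m) m0 := by
  rw [pv_bxor_assoc, pv_bxor_assoc, PySem.Int.bxor_comm m0 m]

-- the (finite) closure of 0 under xor with the masks: all subset xors
def allXors : List Int → List Int
  | [] => [0]
  | m :: ms => allXors ms ++ (allXors ms).map (fun a => PySem.Int.bxor a m)

theorem zero_mem_allXors (ms : List Int) : (0 : Int) ∈ allXors ms := by
  induction ms with
  | nil => simp [allXors]
  | cons m ms ih => simp [allXors]; exact Or.inl ih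

theorem length_allXors (ms : List Int) : (allXors ms).length = 2 ^ ms.length := by
  induction ms with
  | nil => simp [allXors]
  | cons m ms ih => simp [allXors, ih, pow_succ]; ring

theorem allXors_closed (ms : List Int) : ∀ (a m : Int),
    a ∈ allXors ms → m ∈ ms → PySem.Int.bxor a m ∈ allXors ms := by
  induction ms with
  | nil => intro a m _ hm; simp at hm
  | cons m0 ms ih =>
    intro a m ha hm
    simp only [allXors, List.mem_append, List.mem_map] at ha ⊢
    rcases List.mem_cons.mp hm with rfl | hm'
    · rcases ha with ha | ⟨b, hb, rfl⟩
      · exact Or.inr ⟨a, ha, rfl⟩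
      · exact Or.inl (by rw [pv_bxor_cancel]; exact hb)
    · rcases ha with ha | ⟨b, hb, rfl⟩
      · exact Or.inl (ih a m ha hm')
      · exact Or.inr ⟨PySem.Int.bxor b m, ih b m hb hm', by rw [pv_bxor_swap]⟩

-- proof-side intermediate program: level-synchronized BFS (frontier / visited / level counter);
-- A's loop is first shown equal to it, and it in turn equal to B's recursion
def levelExpand (list_of_masks : List Int) (vn : PySem.Set Int × List Int)
    (state : Int) : PySem.Set Int × List Int :=
  list_of_masks.foldl (fun vn mask =>
    let ns := PySem.Int.bxor state mask
    if PySem.Set.contains vn.1 ns then vn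
    else (PySem.Set.add vn.1 ns, vn.2 ++ [ns])) vn

def levelLoop (list_of_masks : List Int) (target : Int) :
    Nat → List Int → PySem.Set Int → Int → Int
  | 0, _, _, _ => -1
  | fuel + 1, frontier, visited, level =>
    if frontier.isEmpty then -1
    else if target ∈ frontier then level
    else
      let vn := frontier.foldl (levelExpand list_of_masks) (visited, [])
      levelLoop list_of_masks target fuel vn.2 vn.1 (level + 1)

-- one frontier state expanded: A's step and the level step produce the same fresh states
theorem step_lemma (x c : Int) :
    ∀ (ms : List Int) (vis nf : List Int) (q : List (Int × Int)), vis.Nodup →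
    ∃ fresh : List Int,
      levelExpand ms (vis, nf) x = (vis ++ fresh, nf ++ fresh) ∧
      bfsStep ms (q, vis) (x, c) = (q ++ fresh.map (fun s => (s, c + 1)), vis ++ fresh) ∧
      (vis ++ fresh).Nodup ∧
      (∀ y ∈ fresh, ∃ m ∈ ms, y = PySem.Int.bxor x m) ∧
      (∀ m ∈ ms, PySem.Int.bxor x m ∈ vis ++ fresh) := by
  intro ms
  induction ms with
  | nil => intro vis nf q hnd; exact ⟨[], by simp [levelExpand, bfsStep, hnd]⟩
  | cons m ms ih =>
    intro vis nf q hnd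
    by_cases hmem : PySem.Int.bxor x m ∈ vis
    · obtain ⟨fresh, h1, h2, h3, h4, h5⟩ := ih vis nf q hnd
      refine ⟨fresh, ?_, ?_, h3, ?_, ?_⟩
      · simpa [levelExpand, hmem] using h1
      · simpa [bfsStep, hmem] using h2
      · intro y hy; obtain ⟨m', hm', hy'⟩ := h4 y hy; exact ⟨m', List.mem_cons_of_mem _ hm', hy'⟩
      · intro m' hm'
        rcases List.mem_cons.mp hm' with rfl | hm''
        · exact List.mem_append.mpr (Or.inl hmem)
        · exact h5 m' hm''
    · have hadd : PySem.Set.add vis (PySem.Int.bxor x m) = vis ++ [PySem.Int.bxor x m] := by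
        simp [PySem.Set.add, hmem]
      have hnd' : (vis ++ [PySem.Int.bxor x m]).Nodup := by
        simp [List.nodup_append, hnd]
        intro a ha h
        exact hmem (h ▸ ha)
      obtain ⟨fresh, h1, h2, h3, h4, h5⟩ :=
        ih (vis ++ [PySem.Int.bxor x m]) (nf ++ [PySem.Int.bxor x m])
           (q ++ [(PySem.Int.bxor x m, c + 1)]) hnd'
      refine ⟨PySem.Int.bxor x m :: fresh, ?_, ?_, ?_, ?_, ?_⟩
      · rw [show levelExpand (m :: ms) (vis, nf) x =
              levelExpand ms (PySem.Set.add vis (PySem.Int.bxor x m),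
                nf ++ [PySem.Int.bxor x m]) x from by simp [levelExpand, hmem]]
        rw [hadd, h1]; simp
      · rw [show bfsStep (m :: ms) (q, vis) (x, c) =
              bfsStep ms (q ++ [(PySem.Int.bxor x m, c + 1)],
                PySem.Set.add vis (PySem.Int.bxor x m)) (x, c) from by simp [bfsStep, hmem]]
        rw [hadd, h2]; simp
      · simpa using h3
      · intro y hy
        rcases List.mem_cons.mp hy with rfl | hy'
        · exact ⟨m, List.mem_cons_self .., rfl⟩
        · obtain ⟨m', hm', hy''⟩ := h4 y hy'; exact ⟨m', List.mem_cons_of_mem _ hm', hy''⟩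
      · intro m' hm'
        rcases List.mem_cons.mp hm' with rfl | hm''
        · simp
        · have := h5 m' hm''
          simpa [List.append_assoc] using this

-- a whole level of the expansion fold
theorem round_lemma (ms : List Int) :
    ∀ (fr vis nf : List Int), vis.Nodup →
    ∃ fresh : List Int,
      fr.foldl (levelExpand ms) (vis, nf) = (vis ++ fresh, nf ++ fresh) ∧
      (vis ++ fresh).Nodup ∧
      (∀ y ∈ fresh, ∃ x ∈ fr, ∃ m ∈ ms, y = PySem.Int.bxor x m) ∧
      (∀ x ∈ fr, ∀ m ∈ ms, PySem.Int.bxor x m ∈ vis ++ fresh) := by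
  intro fr
  induction fr with
  | nil => intro vis nf hnd; exact ⟨[], by simp, by simpa using hnd, by simp, by simp⟩
  | cons x fr' ih =>
    intro vis nf hnd
    obtain ⟨f1, h1, _, h3, h4, h5⟩ := step_lemma x 0 ms vis nf [] hnd
    obtain ⟨f2, g1, g2, g3, g4⟩ := ih (vis ++ f1) (nf ++ f1) h3
    refine ⟨f1 ++ f2, ?_, by simpa using g2, ?_, ?_⟩
    · rw [List.foldl_cons, h1, g1]; simp
    · intro y hy
      rcases List.mem_append.mp hy with hy' | hy'
      · obtain ⟨m, hm, hy''⟩ := h4 y hy'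
        exact ⟨x, List.mem_cons_self .., m, hm, hy''⟩
      · obtain ⟨x', hx', m, hm, hy''⟩ := g3 y hy'
        exact ⟨x', List.mem_cons_of_mem _ hx', m, hm, hy''⟩
    · intro x' hx' m hm
      rcases List.mem_cons.mp hx' with rfl | hx''
      · rw [← List.append_assoc]
        exact List.mem_append_left f2 (h5 m hm)
      · have := g4 x' hx'' m hm
        simpa [List.append_assoc] using this

theorem bfsLoop_nil (ms : List Int) (t : Int) (fuel : Nat) (vis : PySem.Set Int) :
    bfsLoop ms t fuel [] vis = -1 := by
  cases fuel <;> simp [bfsLoop]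

theorem levelLoop_nil (ms : List Int) (t : Int) (fuel : Nat) (vis : PySem.Set Int) (L : Int) :
    levelLoop ms t fuel [] vis L = -1 := by
  cases fuel <;> simp [levelLoop]

-- A's loop processes one whole level: queue holds the rest of the current frontier (count L)
-- followed by the already generated part of the next frontier (count L+1)
theorem inner_lemma (ms : List Int) (target L : Int) :
    ∀ (rest : List Int) (vis acc : List Int) (fuel : Nat), vis.Nodup →
    bfsLoop ms target (fuel + rest.length)
        (rest.map (fun s => (s, L)) ++ acc.map (fun s => (s, L + 1))) vis
      = if target ∈ rest then L
        else bfsLoop ms target fuel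
              ((rest.foldl (levelExpand ms) (vis, acc)).2.map (fun s => (s, L + 1)))
              (rest.foldl (levelExpand ms) (vis, acc)).1 := by
  intro rest
  induction rest with
  | nil => intro vis acc fuel hnd; simp
  | cons x rest' ih =>
    intro vis acc fuel hnd
    have hlen : fuel + (x :: rest').length = (fuel + rest'.length) + 1 := by
      simp [List.length_cons]; omega
    rw [hlen]
    by_cases hx : x = target
    · subst hx
      simp [bfsLoop, List.mem_cons]
    · obtain ⟨fresh, h1, h2, h3, _, _⟩ := step_lemma x L ms vis acc
        (rest'.map (fun s => (s, L)) ++ acc.map (fun s => (s, L + 1))) hnd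
      have hq : (rest'.map (fun s => (s, L)) ++ acc.map (fun s => (s, L + 1)))
            ++ fresh.map (fun s => (s, L + 1))
          = rest'.map (fun s => (s, L)) ++ (acc ++ fresh).map (fun s => (s, L + 1)) := by
        simp
      have hstep := ih (vis ++ fresh) (acc ++ fresh) fuel h3
      rw [show ((x :: rest').map (fun s => (s, L)) ++ acc.map (fun s => (s, L + 1)))
            = (x, L) :: (rest'.map (fun s => (s, L)) ++ acc.map (fun s => (s, L + 1))) from by simp]
      rw [show bfsLoop ms target ((fuel + rest'.length) + 1)
            ((x, L) :: (rest'.map (fun s => (s, L)) ++ acc.map (fun s => (s, L + 1)))) vis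
          = bfsLoop ms target (fuel + rest'.length)
              (bfsStep ms (rest'.map (fun s => (s, L)) ++ acc.map (fun s => (s, L + 1)), vis) (x, L)).1
              (bfsStep ms (rest'.map (fun s => (s, L)) ++ acc.map (fun s => (s, L + 1)), vis) (x, L)).2
          from by simp [bfsLoop, hx]]
      rw [h2]
      simp only [hq]
      rw [hstep]
      have hfold : (x :: rest').foldl (levelExpand ms) (vis, acc)
          = rest'.foldl (levelExpand ms) (vis ++ fresh, acc ++ fresh) := by
        rw [List.foldl_cons, h1]
      rw [← hfold]
      simp [List.mem_cons, Ne.symm hx]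

-- the level-by-level simulation: A's loop on a frontier-shaped queue equals the level loop
theorem sim_lemma (ms : List Int) (target : Int) :
    ∀ (fuelB : Nat) (fr vis : List Int) (L : Int) (fuelA : Nat),
    vis.Nodup → (∀ y ∈ vis, y ∈ allXors ms) → (∀ y ∈ fr, y ∈ vis) →
    (allXors ms).length - vis.length + fr.length ≤ fuelA →
    (allXors ms).length - vis.length + 1 ≤ fuelB →
    bfsLoop ms target fuelA (fr.map (fun s => (s, L))) vis
      = levelLoop ms target fuelB fr vis L := by
  intro fuelB
  induction fuelB with
  | zero => intro fr vis L fuelA _ _ _ _ hB; omega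
  | succ fuelB ih =>
    intro fr vis L fuelA hnd hsub hfv hA hB
    rcases fr with _ | ⟨x, fr'⟩
    · simp [bfsLoop_nil, levelLoop_nil]
    · have hvle : vis.length ≤ (allXors ms).length := (hnd.subperm hsub).length_le
      have hlfr : ((x :: fr') : List Int).length = fr'.length + 1 := by simp
      have hfuelA : fuelA = (fuelA - (fr'.length + 1)) + (x :: fr').length := by
        rw [hlfr]; omega
      have hinner :
          bfsLoop ms target ((fuelA - (fr'.length + 1)) + (x :: fr').length)
              ((x :: fr').map (fun s => (s, L))) vis
            = if target ∈ x :: fr' then L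
              else bfsLoop ms target (fuelA - (fr'.length + 1))
                    (((x :: fr').foldl (levelExpand ms) (vis, [])).2.map (fun s => (s, L + 1)))
                    ((x :: fr').foldl (levelExpand ms) (vis, [])).1 := by
        simpa using inner_lemma ms target L (x :: fr') vis [] (fuelA - (fr'.length + 1)) hnd
      have hBstep :
          levelLoop ms target (fuelB + 1) (x :: fr') vis L
            = if target ∈ x :: fr' then L
              else levelLoop ms target fuelB
                    ((x :: fr').foldl (levelExpand ms) (vis, [])).2
                    ((x :: fr').foldl (levelExpand ms) (vis, [])).1 (L + 1) := by
        simp [levelLoop]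
      rw [hfuelA, hinner, hBstep]
      by_cases htar : target ∈ x :: fr'
      · simp [htar]
      · simp only [htar, if_false]
        obtain ⟨fresh, hr1, hr2, hr3, _⟩ := round_lemma ms (x :: fr') vis [] hnd
        have hr1' : (x :: fr').foldl (levelExpand ms) (vis, []) = (vis ++ fresh, fresh) := by
          simpa using hr1
        rw [hr1']
        rcases List.eq_nil_or_concat' fresh with rfl | hne
        · simp [bfsLoop_nil, levelLoop_nil]
        · have hfne : fresh ≠ [] := by rcases hne with ⟨ys, y, rfl⟩; simp
          have hfpos : 0 < fresh.length := List.length_pos_iff.mpr hfne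
          have hsub' : ∀ y ∈ vis ++ fresh, y ∈ allXors ms := by
            intro y hy
            rcases List.mem_append.mp hy with hy' | hy'
            · exact hsub y hy'
            · obtain ⟨x', hx', m, hm, rfl⟩ := hr3 y hy'
              exact allXors_closed ms x' m (hsub x' (hfv x' hx')) hm
          have hvle' : (vis ++ fresh).length ≤ (allXors ms).length :=
            (hr2.subperm hsub').length_le
          have hlen' : (vis ++ fresh).length = vis.length + fresh.length := by simp
          apply ih fresh (vis ++ fresh) (L + 1) (fuelA - (fr'.length + 1)) hr2 hsub'
          · intro y hy; exact List.mem_append.mpr (Or.inr hy)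
          · rw [hlfr] at hA; omega
          · omega

theorem bfs_eq_level (ms : List Int) (target : Int) :
    bfs ms target = levelLoop ms target (2 ^ ms.length + 1) [0] [0] 0 := by
  unfold bfs
  have hvis : (PySem.Set.add PySem.Set.empty (0:Int)) = [0] := rfl
  rw [hvis]
  rw [show ([((0:Int), (0:Int))] : List (Int × Int))
      = [(0:Int)].map (fun s => (s, (0:Int))) from rfl]
  apply sim_lemma ms target (2 ^ ms.length + 1) [0] [0] 0 (2 ^ ms.length + 1)
  · simp
  · intro y hy
    simp at hy
    subst hy
    exact zero_mem_allXors ms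
  · intro y hy; exact hy
  · have h1 : 1 ≤ 2 ^ ms.length := Nat.one_le_two_pow
    rw [length_allXors]; simp only [List.length_cons, List.length_nil]; omega
  · have h1 : 1 ≤ 2 ^ ms.length := Nat.one_le_two_pow
    rw [length_allXors]; simp only [List.length_cons, List.length_nil]; omega

-- ===== reachability in at most k xor steps =====
def R (ms : List Int) : Nat → Int → Prop
  | 0, t => t = 0
  | k + 1, t => R ms k t ∨ ∃ s, R ms k s ∧ ∃ m ∈ ms, t = PySem.Int.bxor s m

theorem R_succ (ms : List Int) (k : Nat) (t : Int) :
    R ms (k + 1) t ↔ (R ms k t ∨ ∃ s, R ms k s ∧ ∃ m ∈ ms, t = PySem.Int.bxor s m) :=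
  Iff.rfl

theorem R_mono (ms : List Int) : ∀ {j k : Nat}, j ≤ k → ∀ {t}, R ms j t → R ms k t := by
  intro j k hjk
  induction k with
  | zero => intro t h; have hj0 : j = 0 := Nat.le_zero.mp hjk; subst hj0; exact h
  | succ k ih =>
    intro t h
    rcases Nat.lt_or_ge j (k + 1) with hlt | hge
    · exact Or.inl (ih (by omega) h)
    · have : j = k + 1 := by omega
      exact this ▸ h

theorem R_stuck (ms : List Int) (k : Nat)
    (h : ∀ t, R ms (k + 1) t → R ms k t) :
    ∀ d t, R ms (k + d) t → R ms k t := by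
  intro d
  induction d with
  | zero => intro t ht; exact ht
  | succ d ih =>
    intro t ht
    rcases ht with ht | ⟨s, hs, m, hm, rfl⟩
    · exact ih t ht
    · exact h _ (Or.inr ⟨s, ih s hs, m, hm, rfl⟩)

-- xor of a list
def xorList (l : List Int) : Int := l.foldr PySem.Int.bxor 0

theorem xorList_nil : xorList [] = 0 := rfl
theorem xorList_cons (x : Int) (l : List Int) :
    xorList (x :: l) = PySem.Int.bxor x (xorList l) := rfl

theorem xorList_perm {l l' : List Int} (h : l.Perm l') : xorList l = xorList l' := by
  induction h with
  | nil => rfl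
  | cons x _ ih => rw [xorList_cons, xorList_cons, ih]
  | swap x y l =>
    rw [xorList_cons, xorList_cons, xorList_cons, xorList_cons,
      ← pv_bxor_assoc, ← pv_bxor_assoc, PySem.Int.bxor_comm y x]
  | trans _ _ ih1 ih2 => exact ih1.trans ih2

theorem seq_R (ms : List Int) : ∀ l : List Int, (∀ x ∈ l, x ∈ ms) →
    R ms l.length (xorList l) := by
  intro l
  induction l with
  | nil => intro _; rfl
  | cons x l ih =>
    intro hmem
    exact Or.inr ⟨xorList l, ih (fun y hy => hmem y (List.mem_cons_of_mem _ hy)),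
      x, hmem x (List.mem_cons_self ..), (PySem.Int.bxor_comm _ _)⟩

theorem R_seq (ms : List Int) : ∀ (k : Nat) (t : Int), R ms k t →
    ∃ l : List Int, (∀ x ∈ l, x ∈ ms) ∧ l.length ≤ k ∧ xorList l = t := by
  intro k
  induction k with
  | zero => intro t ht; exact ⟨[], by simp, by simp, ht ▸ rfl⟩
  | succ k ih =>
    intro t ht
    rcases ht with ht | ⟨s, hs, m, hm, rfl⟩
    · obtain ⟨l, h1, h2, h3⟩ := ih t ht
      exact ⟨l, h1, by omega, h3⟩
    · obtain ⟨l, h1, h2, h3⟩ := ih s hs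
      refine ⟨m :: l, ?_, by simp; omega, ?_⟩
      · intro x hx
        rcases List.mem_cons.mp hx with rfl | hx'
        · exact hm
        · exact h1 x hx'
      · rw [xorList_cons, h3, PySem.Int.bxor_comm]

-- parity reduction: any sequence over ms xors like a sublist of ms of no greater length
theorem xor_reduce (ms : List Int) : ∀ (N : Nat) (l : List Int), l.length ≤ N →
    (∀ x ∈ l, x ∈ ms) →
    ∃ u, u.Sublist ms ∧ xorList u = xorList l ∧ u.length ≤ l.length := by
  intro N
  induction N with
  | zero =>
    intro l hlen _
    have : l = [] := List.length_eq_zero_iff.mp (by omega)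
    subst this
    exact ⟨[], List.nil_sublist ms, rfl, le_refl _⟩
  | succ N ih =>
    intro l hlen hmem
    by_cases hnd : l.Nodup
    · obtain ⟨u, hperm, hsub⟩ := List.subperm_of_subset hnd (fun x hx => hmem x hx)
      exact ⟨u, hsub, xorList_perm hperm, le_of_eq hperm.length_eq⟩
    · obtain ⟨x, hdup⟩ := List.exists_duplicate_iff_not_nodup.mpr hnd
      have hcnt : 2 ≤ l.count x := List.duplicate_iff_two_le_count.mp hdup
      have hx1 : x ∈ l := List.count_pos_iff.mp (by omega)
      have hp1 : l.Perm (x :: l.erase x) := List.perm_cons_erase hx1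
      have hx2 : x ∈ l.erase x := by
        have : (l.erase x).count x = l.count x - 1 := List.count_erase_self
        exact List.count_pos_iff.mp (by omega)
      have hp2 : (l.erase x).Perm (x :: (l.erase x).erase x) := List.perm_cons_erase hx2
      have hp : l.Perm (x :: x :: (l.erase x).erase x) := hp1.trans (hp2.cons x)
      have hmem' : ∀ y ∈ (l.erase x).erase x, y ∈ ms := by
        intro y hy
        exact hmem y (List.erase_subset (List.erase_subset hy))
      have hlel : (l.erase x).length = l.length - 1 := List.length_erase_of_mem hx1
      have hlel2 : ((l.erase x).erase x).length = (l.erase x).length - 1 :=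
        List.length_erase_of_mem hx2
      have hlpos : 2 ≤ l.length := le_trans hcnt (List.count_le_length)
      obtain ⟨u, h1, h2, h3⟩ := ih ((l.erase x).erase x) (by omega) hmem'
      refine ⟨u, h1, ?_, by omega⟩
      rw [h2, xorList_perm hp, xorList_cons, xorList_cons, pv_bxor_cancel_left]

-- ===== bestAux characterization =====
theorem bestAux_sound (ms : List Int) : ∀ (t : Int) (n : Nat), bestAux ms t = some n →
    ∃ u, u.Sublist ms ∧ xorList u = t ∧ u.length = n := by
  induction ms with
  | nil =>
    intro t n h
    by_cases ht : t = 0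
    · subst ht
      simp [bestAux] at h
      exact ⟨[], List.nil_sublist _, rfl, h ▸ rfl⟩
    · simp [bestAux, ht] at h
  | cons m ms ih =>
    intro t n h
    cases hsk : bestAux ms t <;> cases htk : bestAux ms (PySem.Int.bxor t m) <;>
      simp [bestAux, hsk, htk] at h
    · obtain ⟨u, h1, h2, h3⟩ := ih _ _ htk
      refine ⟨m :: u, h1.cons₂ m, ?_, by simp [h3]; omega⟩
      rw [xorList_cons, h2, PySem.Int.bxor_comm, pv_bxor_cancel]
    · obtain ⟨u, h1, h2, h3⟩ := ih _ _ hsk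
      exact ⟨u, h1.cons m, h2, h ▸ h3⟩
    · rename_i s k
      rcases le_total s (k + 1) with hle | hle
      · obtain ⟨u, h1, h2, h3⟩ := ih _ _ hsk
        exact ⟨u, h1.cons m, h2, by omega⟩
      · obtain ⟨u, h1, h2, h3⟩ := ih _ _ htk
        refine ⟨m :: u, h1.cons₂ m, ?_, by simp [h3]; omega⟩
        rw [xorList_cons, h2, PySem.Int.bxor_comm, pv_bxor_cancel]

theorem bestAux_le (ms : List Int) : ∀ u : List Int, u.Sublist ms →
    ∃ n, n ≤ u.length ∧ bestAux ms (xorList u) = some n := by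
  induction ms with
  | nil =>
    intro u hu
    have : u = [] := List.sublist_nil.mp hu
    subst this
    exact ⟨0, le_refl _, by simp [bestAux, xorList_nil]⟩
  | cons m ms ih =>
    intro u hu
    cases hu with
    | cons _ h =>
      obtain ⟨n, hn, hb⟩ := ih u h
      cases htk : bestAux ms (PySem.Int.bxor (xorList u) m) with
      | none => exact ⟨n, hn, by simp [bestAux, hb, htk]⟩
      | some k =>
        exact ⟨min n (k + 1), le_trans (min_le_left _ _) hn, by simp [bestAux, hb, htk]⟩
    | cons₂ u' h =>
      rename_i u''
      obtain ⟨n, hn, hb⟩ := ih _ h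
      have hkey : PySem.Int.bxor (xorList (m :: u'')) m = xorList u'' := by
        rw [xorList_cons, PySem.Int.bxor_comm m, pv_bxor_cancel]
      cases hsk : bestAux ms (xorList (m :: u'')) with
      | none =>
        refine ⟨n + 1, by simp; omega, ?_⟩
        simp [bestAux, hsk, hkey, hb]
      | some s =>
        refine ⟨min s (n + 1), le_trans (min_le_right _ _) (by simp; omega), ?_⟩
        simp [bestAux, hsk, hkey, hb]

theorem bestAux_R (ms : List Int) (t : Int) (n : Nat) (h : bestAux ms t = some n) :
    R ms n t := by
  obtain ⟨u, h1, h2, h3⟩ := bestAux_sound ms t n h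
  have := seq_R ms u (fun x hx => h1.subset hx)
  rwa [h2, h3] at this

theorem R_bestAux (ms : List Int) (k : Nat) (t : Int) (h : R ms k t) :
    ∃ n ≤ k, bestAux ms t = some n := by
  obtain ⟨l, h1, h2, h3⟩ := R_seq ms k t h
  obtain ⟨u, g1, g2, g3⟩ := xor_reduce ms l.length l (le_refl _) h1
  obtain ⟨n, hn, hb⟩ := bestAux_le ms u g1
  rw [g2, h3] at hb
  exact ⟨n, by omega, hb⟩

theorem bestAux_none (ms : List Int) (t : Int) (h : bestAux ms t = none) :
    ∀ k, ¬ R ms k t := by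
  intro k hr
  obtain ⟨n, _, hb⟩ := R_bestAux ms k t hr
  rw [h] at hb
  simp at hb

theorem bestAux_min (ms : List Int) (t : Int) (n : Nat) (h : bestAux ms t = some n) :
    ∀ j < n, ¬ R ms j t := by
  intro j hj hr
  obtain ⟨n', hle, hb⟩ := R_bestAux ms j t hr
  rw [h] at hb
  injection hb with h'
  omega

-- ===== invariants of one level expansion =====
theorem expand_invariants (ms : List Int) (k : Nat) (fr vis : List Int)
    (hnd : vis.Nodup)
    (hax : ∀ y ∈ vis, y ∈ allXors ms)
    (hvis : ∀ y, y ∈ vis ↔ R ms k y)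
    (hfr : ∀ y, y ∈ fr ↔ (R ms k y ∧ ∀ j < k, ¬ R ms j y)) :
    ∃ fresh : List Int,
      fr.foldl (levelExpand ms) (vis, []) = (vis ++ fresh, fresh) ∧
      (vis ++ fresh).Nodup ∧
      (∀ y ∈ vis ++ fresh, y ∈ allXors ms) ∧
      (∀ y, y ∈ vis ++ fresh ↔ R ms (k + 1) y) ∧
      (∀ y, y ∈ fresh ↔ (R ms (k + 1) y ∧ ∀ j < k + 1, ¬ R ms j y)) := by
  obtain ⟨fresh, hr1, hr2, hr3, hr4⟩ := round_lemma ms fr vis [] hnd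
  have hr1' : fr.foldl (levelExpand ms) (vis, []) = (vis ++ fresh, fresh) := by
    simpa using hr1
  have hdisj : ∀ y ∈ fresh, y ∉ vis := by
    intro y hy hyv
    exact (List.disjoint_of_nodup_append hr2) hyv hy
  have hvis' : ∀ y, y ∈ vis ++ fresh ↔ R ms (k + 1) y := by
    intro y
    constructor
    · intro hy
      rcases List.mem_append.mp hy with hy' | hy'
      · exact Or.inl ((hvis y).mp hy')
      · obtain ⟨x, hx, m, hm, rfl⟩ := hr3 y hy'
        exact Or.inr ⟨x, (hvis x).mp ((hvis x).mpr ((hfr x).mp hx).1), m, hm, rfl⟩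
    · intro hy
      rcases hy with hy | ⟨s, hs, m, hm, rfl⟩
      · exact List.mem_append.mpr (Or.inl ((hvis _).mpr hy))
      · by_cases hsf : s ∈ fr
        · exact hr4 s hsf m hm
        · have hsv : R ms k s := hs
          have : ¬ (R ms k s ∧ ∀ j < k, ¬ R ms j s) := fun hc => hsf ((hfr s).mpr hc)
          push Not at this
          obtain ⟨j, hj, hRj⟩ := this hsv
          have : R ms k (PySem.Int.bxor s m) :=
            R_mono ms (by omega) ((R_succ ms j _).mpr (Or.inr ⟨s, hRj, m, hm, rfl⟩))
          exact List.mem_append.mpr (Or.inl ((hvis _).mpr this))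
  refine ⟨fresh, hr1', hr2, ?_, hvis', ?_⟩
  · intro y hy
    rcases List.mem_append.mp hy with hy' | hy'
    · exact hax y hy'
    · obtain ⟨x, hx, m, hm, rfl⟩ := hr3 y hy'
      exact allXors_closed ms x m (hax x ((hvis x).mpr ((hfr x).mp hx).1)) hm
  · intro y
    constructor
    · intro hy
      refine ⟨(hvis' y).mp (List.mem_append.mpr (Or.inr hy)), ?_⟩
      intro j hj hRj
      have : R ms k y := R_mono ms (by omega) hRj
      exact hdisj y hy ((hvis y).mpr this)
    · rintro ⟨hR, hmin⟩
      have hy : y ∈ vis ++ fresh := (hvis' y).mpr hR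
      rcases List.mem_append.mp hy with hy' | hy'
      · exact absurd ((hvis y).mp hy') (hmin k (by omega))
      · exact hy'

-- when a level's frontier characterization is empty, reachability is stuck at this level
theorem frontier_empty_stuck (ms : List Int) (k : Nat)
    (h : ∀ y, ¬ (R ms (k + 1) y ∧ ∀ j < k + 1, ¬ R ms j y)) :
    ∀ t, R ms (k + 1) t → R ms k t := by
  intro t ht
  have := h t
  push Not at this
  obtain ⟨j, hj, hRj⟩ := this ht
  exact R_mono ms (by omega) hRj

-- the level loop finds the minimal level n at which target is reachable
theorem level_hit (ms : List Int) (target : Int) (n : Nat)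
    (hRn : R ms n target) (hmin : ∀ j < n, ¬ R ms j target) :
    ∀ (fuelB : Nat) (fr vis : List Int) (k : Nat),
    k ≤ n →
    vis.Nodup →
    (∀ y ∈ vis, y ∈ allXors ms) →
    (∀ y, y ∈ vis ↔ R ms k y) →
    (∀ y, y ∈ fr ↔ (R ms k y ∧ ∀ j < k, ¬ R ms j y)) →
    (allXors ms).length - vis.length + 1 ≤ fuelB →
    levelLoop ms target fuelB fr vis (k : Int) = (n : Int) := by
  intro fuelB
  induction fuelB with
  | zero => intro fr vis k _ _ _ _ _ hB; omega
  | succ fuelB ih =>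
    intro fr vis k hkn hnd hax hvis hfr hB
    have hfrne : fr ≠ [] := by
      intro hfe
      subst hfe
      cases k with
      | zero =>
        have : (0 : Int) ∈ ([] : List Int) :=
          (hfr 0).mpr ⟨rfl, by omega⟩
        simp at this
      | succ k' =>
        have hdown : ∀ t, R ms (k' + 1) t → R ms k' t := by
          apply frontier_empty_stuck
          intro y hy
          exact (List.mem_nil_iff y).mp ((hfr y).mpr hy)
        have : R ms k' target := by
          have := R_stuck ms k' hdown (n - k') target
          apply this
          have hkn' : k' + (n - k') = n := by omega
          rwa [hkn']
        exact hmin k' (by omega) this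
    by_cases hk : k = n
    · subst hk
      have htar : target ∈ fr := (hfr target).mpr ⟨hRn, hmin⟩
      simp [levelLoop, hfrne, htar]
    · have hkn' : k < n := by omega
      have htar : target ∉ fr := fun hc => hmin k hkn' ((hfr target).mp hc).1
      obtain ⟨fresh, he1, he2, he3, he4, he5⟩ := expand_invariants ms k fr vis hnd hax hvis hfr
      have hfne : fresh ≠ [] := by
        intro hfe
        have hdown : ∀ t, R ms (k + 1) t → R ms k t := by
          apply frontier_empty_stuck
          intro y hy
          have := (he5 y).mpr hy
          rw [hfe] at this
          simp at this
        have : R ms k target := by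
          have := R_stuck ms k hdown (n - k) target
          apply this
          have hkn'' : k + (n - k) = n := by omega
          rwa [hkn'']
        exact hmin k hkn' this
      have hfpos : 0 < fresh.length := List.length_pos_iff.mpr hfne
      have hstep : levelLoop ms target (fuelB + 1) fr vis (k : Int)
          = levelLoop ms target fuelB fresh (vis ++ fresh) ((k : Int) + 1) := by
        simp [levelLoop, hfrne, htar, he1]
      rw [hstep]
      have hcast : ((k : Int) + 1) = ((k + 1 : Nat) : Int) := by push_cast; ring
      rw [hcast]
      apply ih fresh (vis ++ fresh) (k + 1) (by omega) he2 he3 he4 he5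
      have hvle2 : (vis ++ fresh).length <= (allXors ms).length :=
        (he2.subperm (fun x hx => he3 x hx)).length_le
      have : (vis ++ fresh).length = vis.length + fresh.length := by simp
      omega

-- if target is reachable at no level, the level loop returns -1
theorem level_miss (ms : List Int) (target : Int)
    (hnone : ∀ k, ¬ R ms k target) :
    ∀ (fuelB : Nat) (fr vis : List Int) (k : Nat),
    vis.Nodup →
    (∀ y ∈ vis, y ∈ allXors ms) →
    (∀ y, y ∈ vis ↔ R ms k y) →
    (∀ y, y ∈ fr ↔ (R ms k y ∧ ∀ j < k, ¬ R ms j y)) →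
    (allXors ms).length - vis.length + 1 ≤ fuelB →
    levelLoop ms target fuelB fr vis (k : Int) = -1 := by
  intro fuelB
  induction fuelB with
  | zero => intro fr vis k _ _ _ _ hB; omega
  | succ fuelB ih =>
    intro fr vis k hnd hax hvis hfr hB
    rcases List.eq_nil_or_concat' fr with rfl | hne
    · exact levelLoop_nil ms target (fuelB + 1) vis (k : Int)
    · have hfrne : fr ≠ [] := by rcases hne with ⟨ys, y, rfl⟩; simp
      have htar : target ∉ fr := fun hc => hnone k ((hfr target).mp hc).1
      obtain ⟨fresh, he1, he2, he3, he4, he5⟩ := expand_invariants ms k fr vis hnd hax hvis hfr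
      have hstep : levelLoop ms target (fuelB + 1) fr vis (k : Int)
          = levelLoop ms target fuelB fresh (vis ++ fresh) ((k : Int) + 1) := by
        simp [levelLoop, hfrne, htar, he1]
      rw [hstep]
      rcases List.eq_nil_or_concat' fresh with rfl | hfne'
      · simp [levelLoop_nil]
      · have hfne : fresh ≠ [] := by rcases hfne' with ⟨ys, y, rfl⟩; simp
        have hfpos : 0 < fresh.length := List.length_pos_iff.mpr hfne
        have hcast : ((k : Int) + 1) = ((k + 1 : Nat) : Int) := by push_cast; ring
        rw [hcast]
        apply ih fresh (vis ++ fresh) (k + 1) he2 he3 he4 he5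
        have hvle2 : (vis ++ fresh).length <= (allXors ms).length :=
          (he2.subperm (fun x hx => he3 x hx)).length_le
        have : (vis ++ fresh).length = vis.length + fresh.length := by simp
        omega

-- ===== VERDICT (by name: the statement is the Claim_ definition above) =====
theorem bfs_spec : Claim_equal_bfs := by
  intro ms target _
  unfold Spec_bfs bfs_alt
  rw [bfs_eq_level]
  have hvis0 : ∀ y : Int, y ∈ ([0] : List Int) ↔ R ms 0 y := by
    intro y; simp [R]
  have hfr0 : ∀ y : Int, y ∈ ([0] : List Int) ↔ (R ms 0 y ∧ ∀ j < 0, ¬ R ms j y) := by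
    intro y; simp [R]
  have hnd0 : ([0] : List Int).Nodup := by simp
  have hax0 : ∀ y ∈ ([0] : List Int), y ∈ allXors ms := by
    intro y hy; simp at hy; subst hy; exact zero_mem_allXors ms
  have hfuel : (allXors ms).length - ([0] : List Int).length + 1 ≤ 2 ^ ms.length + 1 := by
    have h1 : 1 ≤ 2 ^ ms.length := Nat.one_le_two_pow
    rw [length_allXors]; simp only [List.length_cons, List.length_nil]; omega
  cases hb : bestAux ms target with
  | none =>
    have h0 : ((0 : Nat) : Int) = (0 : Int) := rfl
    have := level_miss ms target (bestAux_none ms target hb)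
      (2 ^ ms.length + 1) [0] [0] 0 hnd0 hax0 hvis0 hfr0 hfuel
    rwa [h0] at this
  | some n =>
    have h0 : ((0 : Nat) : Int) = (0 : Int) := rfl
    have := level_hit ms target n (bestAux_R ms target n hb) (bestAux_min ms target n hb)
      (2 ^ ms.length + 1) [0] [0] 0 (by omega) hnd0 hax0 hvis0 hfr0 hfuel
    rwa [h0] at this
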